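-- pv_equiv track=rewrite | github.com/minhchauU23/PythonCodePtit | PYKT072_xoay_vong_xau_ky_tu.py | count
-- ===== SOURCE A (Python) =====
-- def count(a, id):
--     cnt = 0
--     for i in range(len(a)):
--         if i != id:
--             ss = a[i]
--             while ss != a[id]:
--                 cnt += 1
--                 ss = ss[1:] + ss[0]
--                 if ss == a[i]: return -1
--     return cnt
--
-- a = []
-- ===== SOURCE B (Python) =====
-- def count(a, id):
--     # Rotation distance per element via substring search in the doubled string,
--     # instead of rotating one step at a time.
--     if not a:
--         return 0
--     t = a[id]
--     total = 0
--     for i, s in enumerate(a):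
--         if i == id:
--             continue
--         if len(s) != len(t):
--             return -1
--         k = (s + s).find(t)
--         if k == -1:
--             return -1
--         total += k
--     return total
-- ===== Notes on version B (the rewrite author's own statement) =====
-- stated objective: alternative
-- what changed: Instead of rotating each string one character at a time until it matches the target, B finds the rotation distance in one substring search: the first index of the target in the doubled string s+s (after an equal-length check) is exactly the number of single rotations A counts.
import Mathlib
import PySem

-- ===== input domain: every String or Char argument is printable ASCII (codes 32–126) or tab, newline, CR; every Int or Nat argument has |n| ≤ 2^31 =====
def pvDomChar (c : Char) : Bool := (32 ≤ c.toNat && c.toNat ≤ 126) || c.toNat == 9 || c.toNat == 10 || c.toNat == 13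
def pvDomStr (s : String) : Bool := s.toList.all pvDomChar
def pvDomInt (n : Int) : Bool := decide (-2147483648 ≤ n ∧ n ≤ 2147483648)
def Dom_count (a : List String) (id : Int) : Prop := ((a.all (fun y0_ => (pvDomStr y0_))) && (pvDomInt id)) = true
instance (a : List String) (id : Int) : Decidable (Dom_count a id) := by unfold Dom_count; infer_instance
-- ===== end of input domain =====

-- B replaces A's per-element rotate-one-step-at-a-time loop by a single substring
-- search of the target in the doubled string s ++ s (objective: alternative).

-- ===== PORT A =====

-- ss[1:] + ss[0]  (Python raises IndexError on empty ss; pyGet? returns none there,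
-- such inputs are excluded by Pre_count, the `none => ss` arm is arbitrary)
def pvRotA (ss : List Char) : List Char :=
  match PySem.List.pyGet? ss 0 with
  | none => ss
  | some c => PySem.List.slice ss (some 1) none ++ [c]

-- the `while ss != a[id]` loop; `none` encodes Python's `return -1`.
-- fuel: the loop runs at most len(orig)+1 iterations (ss returns to orig after
-- at most len(orig) rotations); fuel 0 is unreachable under Pre_count.
def pvInnerA (t orig : List Char) : Nat → List Char → Int → Option Int
  | 0, _, _ => none
  | fuel + 1, ss, cnt =>
    if ss = t then some cnt
    else
      let ss' := pvRotA ss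
      if ss' = orig then none
      else pvInnerA t orig fuel ss' (cnt + 1)

-- the `for i in range(len(a))` loop over the index list; `none` = `return -1`
def pvOuterA (a : List String) (id : Int) (t : List Char) : List Int → Int → Option Int
  | [], cnt => some cnt
  | i :: rest, cnt =>
    if i ≠ id then
      let s := (PySem.List.pyGetD a i "").toList
      match pvInnerA t s (s.length + 1) s cnt with
      | none => none
      | some cnt' => pvOuterA a id t rest cnt'
    else pvOuterA a id t rest cnt

def count (a : List String) (id : Int) : Int :=
  match pvOuterA a id ((PySem.List.pyGetD a id "").toList)
      (PySem.List.pyRange 0 (PySem.List.len a) 1) 0 with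
  | none => -1
  | some cnt => cnt

-- ===== PORT B =====

-- the `for i, s in enumerate(a)` loop of Source B; `none` = `return -1`
def pvAltLoop (id : Int) (t : List Char) : List (Int × String) → Int → Option Int
  | [], total => some total
  | (i, s) :: rest, total =>
    if i = id then pvAltLoop id t rest total
    else if s.toList.length ≠ t.length then none
    else
      let k := PySem.Chars.find (s.toList ++ s.toList) t
      if k = -1 then none
      else pvAltLoop id t rest (total + k)

def count_alt (a : List String) (id : Int) : Int :=
  if a = [] then 0
  else
    match pvAltLoop id ((PySem.List.pyGetD a id "").toList) (PySem.List.enumerate a) 0 with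
    | none => -1
    | some total => total

-- ===== PRECONDITION & SPEC =====

-- helper for Pre_count: no rotation of s equals t (so A's inner loop on s returns -1)
def pvNonRot (s : String) (t : List Char) : Bool :=
  decide (∀ k < s.toList.length + 1, s.toList.rotate k ≠ t)

-- helper for Pre_count: some index j < i with j ≠ id holds a non-rotation of t,
-- so A returns -1 before its loop ever reaches index i
def pvStop (a : List String) (id : Int) (t : List Char) (i : Nat) : Bool :=
  (List.range i).any (fun j => decide ((j : Int) ≠ id) && pvNonRot (a.getD j "") t)

-- Pre_count excludes exactly the inputs where the Python A raises IndexError: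
-- an out-of-range id while some index i ≠ id exists (a[id] is evaluated), and an
-- empty string at some i ≠ id while a[id] is non-empty that the loop actually
-- reaches (no earlier non-rotation of a[id] returns -1 first): ss[0] on "".
def Pre_count (a : List String) (id : Int) : Prop :=
  (∀ i < a.length, (i : Int) = id) ∨
  ((-(a.length : Int) ≤ id ∧ id < a.length) ∧
    ∀ i < a.length, (i : Int) ≠ id → a.getD i "" = "" →
      PySem.List.pyGetD a id "" ≠ "" →
        pvStop a id ((PySem.List.pyGetD a id "").toList) i = true)
instance (a : List String) (id : Int) : Decidable (Pre_count a id) := by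
  unfold Pre_count; infer_instance

def pvWitness_count : List String × Int := (["ab", "ba", "ab"], 0)

def Spec_count (a : List String) (id : Int) (out : Int) : Prop := out = count_alt a id
instance (a : List String) (id : Int) (out : Int) : Decidable (Spec_count a id out) := by
  unfold Spec_count; infer_instance

-- ===== CLAIM (what is proved, stated in full; the proofs are below) =====
def Claim_equal_count : Prop :=
  ∀ (a : List String) (id : Int), Dom_count a id → Pre_count a id → Spec_count a id (count a id)

-- ===== LEMMAS AND PROOFS =====

-- first rotation index of s that equals t (none if t is not a rotation of s)
def pvK (s t : List Char) : Option Nat :=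
  if h : ∃ k, k < s.length ∧ s.rotate k = t then some (Nat.find h) else none

theorem pvK_eq_some {s t : List Char} {k : Nat} (h : pvK s t = some k) :
    k < s.length ∧ s.rotate k = t ∧ ∀ i < k, s.rotate i ≠ t := by
  unfold pvK at h
  split at h
  · rename_i hex
    obtain rfl : Nat.find hex = k := by simpa using h
    refine ⟨(Nat.find_spec hex).1, (Nat.find_spec hex).2, ?_⟩
    intro i hi hit
    exact absurd ⟨lt_trans hi (Nat.find_spec hex).1, hit⟩ (Nat.find_min hex hi)
  · exact absurd h (by simp)

theorem pvK_eq_none {s t : List Char} (h : pvK s t = none) :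
    ∀ k < s.length, s.rotate k ≠ t := by
  unfold pvK at h
  split at h
  · exact absurd h (by simp)
  · rename_i hex
    intro k hk hkt
    exact hex ⟨k, hk, hkt⟩

theorem pvK_of {s t : List Char} {k : Nat} (h1 : k < s.length) (h2 : s.rotate k = t)
    (h3 : ∀ i < k, s.rotate i ≠ t) : pvK s t = some k := by
  unfold pvK
  have hex : ∃ k, k < s.length ∧ s.rotate k = t := ⟨k, h1, h2⟩
  rw [dif_pos hex]
  congr 1
  have hle : Nat.find hex ≤ k := Nat.find_min' hex ⟨h1, h2⟩
  rcases lt_or_eq_of_le hle with hlt | heq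
  · exact absurd (Nat.find_spec hex).2 (h3 _ hlt)
  · exact heq

theorem pvRotA_rotate (s : List Char) (hs : s ≠ []) (j : Nat) :
    pvRotA (s.rotate j) = s.rotate (j + 1) := by
  have hu : s.rotate j ≠ [] := by
    simp [List.rotate_eq_nil_iff, hs]
  obtain ⟨x, xs, hxs⟩ := List.exists_cons_of_ne_nil hu
  have h1 : s.rotate (j + 1) = xs ++ [x] := by
    rw [← List.rotate_rotate, hxs]
    simp [List.rotate_cons_succ]
  simp [pvRotA, hxs, PySem.List.slice_from_one, h1]

theorem rotate_mod_period (s : List Char) (p : Nat) (hp : s.rotate p = s) (hp0 : 0 < p) :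
    ∀ k, s.rotate k = s.rotate (k % p) := by
  intro k
  induction k using Nat.strong_induction_on with
  | _ k ih =>
    by_cases hk : k < p
    · rw [Nat.mod_eq_of_lt hk]
    · calc s.rotate k = s.rotate (p + (k - p)) := by congr 1; omega
        _ = (s.rotate p).rotate (k - p) := (List.rotate_rotate s p (k - p)).symm
        _ = s.rotate (k - p) := by rw [hp]
        _ = s.rotate ((k - p) % p) := ih _ (by omega)
        _ = s.rotate (k % p) := by rw [← Nat.mod_eq_sub_mod (by omega)]

theorem pvInnerA_eq (s t : List Char) (hs : s ≠ []) :
    ∀ (fuel j : Nat) (c : Int), j ≤ s.length → s.length + 1 - j ≤ fuel →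
    (∀ i < j, s.rotate i ≠ t) → (∀ i, 1 ≤ i → i ≤ j → s.rotate i ≠ s) →
    pvInnerA t s fuel (s.rotate j) c = (pvK s t).map (fun k => c + ((k : Int) - (j : Int))) := by
  intro fuel
  induction fuel with
  | zero => intro j c hj hf _ _; omega
  | succ fuel ih =>
    intro j c hj hf inv1 inv2
    have hlen0 : 0 < s.length := List.length_pos_iff.mpr hs
    have hjlt : j < s.length := by
      rcases Nat.lt_or_ge j s.length with h | h
      · exact h
      · exact absurd (by rw [show j = s.length by omega, List.rotate_length])
          (inv2 j (by omega) (by omega))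
    by_cases hm : s.rotate j = t
    · have hK : pvK s t = some j := pvK_of hjlt hm inv1
      simp only [pvInnerA, if_pos hm, hK]
      congr 1
      ring
    · simp only [pvInnerA, if_neg hm, pvRotA_rotate s hs j]
      by_cases hp : s.rotate (j + 1) = s
      · rw [if_pos hp]
        have hK : pvK s t = none := by
          unfold pvK
          rw [dif_neg]
          rintro ⟨k, hk, hkt⟩
          have h1 : s.rotate k = s.rotate (k % (j + 1)) :=
            rotate_mod_period s (j + 1) hp (by omega) k
          have h2 : k % (j + 1) < j + 1 := Nat.mod_lt _ (by omega)
          rcases Nat.lt_or_ge (k % (j + 1)) j with hlt | hge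
          · exact inv1 _ hlt (by rw [← h1, hkt])
          · exact hm (by rw [show j = k % (j + 1) by omega, ← h1, hkt])
        rw [hK]
        simp
      · rw [if_neg hp]
        have hrec := ih (j + 1) (c + 1) (by omega) (by omega)
          (by
            intro i hi
            rcases Nat.lt_or_ge i j with h | h
            · exact inv1 i h
            · rw [show i = j by omega]; exact hm)
          (by
            intro i h1 h2
            rcases Nat.lt_or_ge i (j + 1) with h | h
            · exact inv2 i h1 (by omega)
            · rw [show i = j + 1 by omega]; exact hp)
        rw [hrec]
        cases pvK s t with
        | none => simp
        | some k =>
          show some _ = some _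
          congr 1
          push_cast
          ring

theorem pvInnerA_top (s t : List Char) (hs : s ≠ []) (c : Int) :
    pvInnerA t s (s.length + 1) s c = (pvK s t).map (fun k => c + (k : Int)) := by
  have h := pvInnerA_eq s t hs (s.length + 1) 0 c (by omega) (by omega)
    (by intro i hi; omega) (by intro i h1 h2; omega)
  rw [List.rotate_zero] at h
  rw [h]
  cases pvK s t <;> simp

theorem rot_prefix (s t : List Char) (hlen : s.length = t.length) (j : Nat)
    (hj : j ≤ s.length) : t <+: (s ++ s).drop j ↔ s.rotate j = t := by
  rw [List.drop_append_of_le_length hj, List.prefix_iff_eq_take]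
  have htake : (s.drop j ++ s).take t.length = s.rotate j := by
    rw [List.take_append, List.rotate_eq_drop_append_take hj]
    have h2 : t.length - (s.drop j).length = j := by simp; omega
    rw [h2, List.take_of_length_le (by simp; omega)]
  rw [htake]
  exact ⟨fun h => h.symm, fun h => h.symm⟩

theorem find_doubled (s t : List Char) (hs : s ≠ []) (hlen : s.length = t.length) :
    PySem.Chars.find (s ++ s) t =
      (match pvK s t with | some k => (k : Int) | none => -1) := by
  have hlen0 : 0 < s.length := List.length_pos_iff.mpr hs
  cases hK : pvK s t with
  | none =>
    have hn := pvK_eq_none hK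
    show PySem.Chars.find (s ++ s) t = -1
    rw [PySem.Chars.find_eq_neg_one_iff]
    intro hinf
    obtain ⟨jj, hpre⟩ := (PySem.Chars.exists_prefix_drop_iff_isIn t (s ++ s)).mpr
      ((PySem.Chars.isIn_iff_infix t (s ++ s)).mpr hinf)
    have hjle : jj ≤ s.length := by
      have := hpre.length_le
      simp only [List.length_drop, List.length_append] at this
      omega
    have hrot := (rot_prefix s t hlen jj hjle).mp hpre
    rcases Nat.lt_or_ge jj s.length with h | h
    · exact hn jj h hrot
    · apply hn 0 hlen0
      rw [List.rotate_zero]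
      rw [show jj = s.length by omega, List.rotate_length] at hrot
      exact hrot
  | some k =>
    obtain ⟨hk, hkt, hmin⟩ := pvK_eq_some hK
    show PySem.Chars.find (s ++ s) t = (k : Int)
    have hocc : t <+: (s ++ s).drop k := (rot_prefix s t hlen k (le_of_lt hk)).mpr hkt
    have hinf : t <:+: (s ++ s) := (PySem.Chars.isIn_iff_infix t (s ++ s)).mp
      ((PySem.Chars.exists_prefix_drop_iff_isIn t (s ++ s)).mp ⟨k, hocc⟩)
    have h0 : 0 ≤ PySem.Chars.find (s ++ s) t := (PySem.Chars.find_nonneg_iff _ _).mpr hinf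
    obtain ⟨hpre, hmin'⟩ := PySem.Chars.find_spec h0
    have hfk : (PySem.Chars.find (s ++ s) t).toNat ≤ k := by
      by_contra h
      exact hmin' k (by omega) hocc
    have hrotf : s.rotate (PySem.Chars.find (s ++ s) t).toNat = t :=
      (rot_prefix s t hlen _ (by omega)).mp hpre
    have hkf : k ≤ (PySem.Chars.find (s ++ s) t).toNat := by
      by_contra h
      exact hmin _ (by omega) hrotf
    omega

theorem pvK_none_of_len {s t : List Char} (h : s.length ≠ t.length) : pvK s t = none := by
  unfold pvK
  rw [dif_neg]
  rintro ⟨k, _, hkt⟩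
  exact h (by rw [← hkt, List.length_rotate])

theorem loop_eq (a : List String) (id : Int) (t : List Char) :
    ∀ (l : List Int) (c : Int),
    pvOuterA a id t l c =
      pvAltLoop id t (l.map (fun j => (j, PySem.List.pyGetD a j ""))) c := by
  intro l
  induction l with
  | nil => intro c; simp [pvOuterA, pvAltLoop]
  | cons i rest ih =>
    intro c
    by_cases hid : i = id
    · simp only [pvOuterA, pvAltLoop, List.map_cons]
      rw [if_neg (not_not_intro hid), if_pos hid]
      exact ih c
    · simp only [pvOuterA, pvAltLoop, List.map_cons]
      rw [if_pos hid, if_neg hid]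
      by_cases hse : (PySem.List.pyGetD a i "").toList = []
      · rw [hse]
        by_cases hte : t = []
        · subst hte
          simp only [pvInnerA, List.length_nil, List.nil_append, PySem.Chars.find_nil]
          rw [if_neg (not_not_intro rfl), if_neg (by norm_num : (0 : Int) ≠ -1)]
          simpa using ih (c + 0)
        · have h1 : pvInnerA t [] (List.length ([] : List Char) + 1) [] c = none := by
            simp only [pvInnerA, List.length_nil]
            rw [if_neg (fun h => hte h.symm)]
            simp [pvRotA, PySem.List.pyGet?_zero]
          rw [h1, if_pos (by simp [Ne.symm, hte, eq_comm, List.length_eq_zero_iff])]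
      · rw [pvInnerA_top _ t hse c]
        by_cases hll : ((PySem.List.pyGetD a i "").toList).length = t.length
        · rw [if_neg (not_not_intro hll), find_doubled _ t hse hll]
          cases pvK (PySem.List.pyGetD a i "").toList t with
          | none => simp
          | some k =>
            have hkk : ((k : Int)) ≠ -1 := by omega
            rw [if_neg hkk]
            exact ih (c + k)
        · rw [if_pos hll, pvK_none_of_len hll]
          simp

-- ===== VERDICT (by name: the statement is the Claim_ definition above) =====
theorem count_spec : Claim_equal_count := by
  intro a id _dom _pre
  unfold Spec_count count count_alt
  by_cases ha : a = []
  · subst ha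
    simp [pvOuterA]
  · rw [if_neg ha, loop_eq a id ((PySem.List.pyGetD a id "").toList) _ 0,
      ← PySem.List.enumerate_eq_map_pyRange a ""]
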